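-- pv_equiv track=rewrite | github.com/sablet/task_prompt_orchestrator | src/task_prompt_orchestrator/orchestrator.py | is_permission_error
-- ===== SOURCE A (Python) =====
-- def is_permission_error(feedback: str) -> bool:
--     """Check if the feedback indicates a permission error."""
--     if not feedback:
--         return False
--     feedback_lower = feedback.lower()
--     permission_indicators = [
--         "permission",
--         "haven't granted",
--         "not allowed",
--         "access denied",
--         "unauthorized",
--     ]
--     return any(indicator in feedback_lower for indicator in permission_indicators)
-- ===== SOURCE B (Python) =====
-- import re
--
-- _PERMISSION_RE = re.compile(
--     "permission|haven't granted|not allowed|access denied|unauthorized"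
-- )
--
--
-- def is_permission_error(feedback: str) -> bool:
--     """Check if the feedback indicates a permission error."""
--     return bool(_PERMISSION_RE.search(feedback.lower()))
-- ===== Notes on version B (the rewrite author's own statement) =====
-- stated objective: idiomatic
-- what changed: Replaces five independent substring containment tests (plus an empty-string guard) with a single pre-compiled alternation regex scanned once over the lowered string.
import Mathlib
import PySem

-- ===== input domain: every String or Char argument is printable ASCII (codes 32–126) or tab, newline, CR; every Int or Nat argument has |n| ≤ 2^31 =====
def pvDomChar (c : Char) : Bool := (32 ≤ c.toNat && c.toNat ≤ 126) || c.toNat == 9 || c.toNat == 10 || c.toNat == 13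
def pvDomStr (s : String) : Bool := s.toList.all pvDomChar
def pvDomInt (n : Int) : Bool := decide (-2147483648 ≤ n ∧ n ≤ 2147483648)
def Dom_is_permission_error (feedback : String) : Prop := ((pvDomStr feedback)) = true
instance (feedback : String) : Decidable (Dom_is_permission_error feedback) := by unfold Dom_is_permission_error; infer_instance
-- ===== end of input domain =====

-- B scans the lowered string once with a single alternation pattern instead of A's five
-- independent containment tests; equivalence of the return value is proved on all of Dom.

-- ===== PORT A =====
def is_permission_error (feedback : String) : Bool :=
  if PySem.Str.len feedback == 0 then false
  else
    let feedback_lower := PySem.Str.lower feedback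
    let permission_indicators : List String :=
      ["permission", "haven't granted", "not allowed", "access denied", "unauthorized"]
    permission_indicators.any (fun indicator => PySem.Str.isIn indicator feedback_lower)

-- ===== PORT B =====
-- the alternatives of the compiled regex, as character lists
def pvAlts : List (List Char) :=
  ["permission".toList, "haven't granted".toList, "not allowed".toList,
   "access denied".toList, "unauthorized".toList]

-- one left-to-right scan: at each position try every alternative as a prefix
-- (this is what re.search of a literal alternation does)
def pvScan (cs : List Char) : Bool :=
  match cs with
  | [] => false
  | _ :: t => pvAlts.any (fun a => List.isPrefixOf a cs) || pvScan t

def is_permission_error_alt (feedback : String) : Bool :=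
  pvScan (PySem.Str.lower feedback).toList

-- ===== PRECONDITION & SPEC =====
def Spec_is_permission_error (feedback : String) (out : Bool) : Prop := out = is_permission_error_alt feedback
instance (feedback : String) (out : Bool) : Decidable (Spec_is_permission_error feedback out) := by unfold Spec_is_permission_error; infer_instance

-- ===== CLAIM (what is proved, stated in full; the proofs are below) =====
def Claim_equal_is_permission_error : Prop := ∀ (feedback : String), Dom_is_permission_error feedback → Spec_is_permission_error feedback (is_permission_error feedback)

-- ===== LEMMAS AND PROOFS =====

lemma pvScan_iff (cs : List Char) : pvScan cs = true ↔ ∃ a ∈ pvAlts, a <:+: cs := by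
  induction cs with
  | nil =>
    apply iff_of_false (by simp [pvScan])
    rintro ⟨a, ha, hinf⟩
    rw [List.infix_nil] at hinf
    subst hinf
    revert ha; decide
  | cons c t ih =>
    simp only [pvScan, Bool.or_eq_true, List.any_eq_true, ih,
      List.isPrefixOf_iff_prefix]
    constructor
    · rintro (⟨a, ha, hp⟩ | ⟨a, ha, hi⟩)
      · exact ⟨a, ha, hp.isInfix⟩
      · exact ⟨a, ha, List.infix_cons hi⟩
    · rintro ⟨a, ha, hi⟩
      rcases List.infix_cons_iff.mp hi with hp | hi'
      · exact Or.inl ⟨a, ha, hp⟩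
      · exact Or.inr ⟨a, ha, hi'⟩

lemma pvA_iff (feedback : String) :
    is_permission_error feedback = true ↔
      ∃ a ∈ pvAlts, a <:+: (PySem.Str.lower feedback).toList := by
  unfold is_permission_error
  by_cases h : PySem.Str.len feedback == 0
  · rw [if_pos h]
    apply iff_of_false (by decide)
    have hlen : feedback.toList.length = 0 := by
      have := (beq_iff_eq).mp h
      simpa [PySem.Str.len_eq] using this
    rintro ⟨a, ha, hinf⟩
    have hnil : (PySem.Str.lower feedback).toList = [] := by
      simp [PySem.Str.toList_lower, PySem.Chars.lower, List.eq_nil_of_length_eq_zero hlen]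
    rw [hnil, List.infix_nil] at hinf
    subst hinf
    revert ha; decide
  · rw [if_neg (by simpa using h)]
    simp only [List.any_eq_true]
    constructor
    · rintro ⟨ind, hind, hin⟩
      refine ⟨ind.toList, ?_, (PySem.Str.isIn_iff_infix ind _).mp hin⟩
      simp only [List.mem_cons, List.not_mem_nil, or_false] at hind
      rcases hind with rfl | rfl | rfl | rfl | rfl <;> decide
    · rintro ⟨a, ha, hinf⟩
      simp only [pvAlts, List.mem_cons, List.not_mem_nil, or_false] at ha
      rcases ha with rfl | rfl | rfl | rfl | rfl
      · exact ⟨"permission", by decide, (PySem.Str.isIn_iff_infix _ _).mpr hinf⟩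
      · exact ⟨"haven't granted", by decide, (PySem.Str.isIn_iff_infix _ _).mpr hinf⟩
      · exact ⟨"not allowed", by decide, (PySem.Str.isIn_iff_infix _ _).mpr hinf⟩
      · exact ⟨"access denied", by decide, (PySem.Str.isIn_iff_infix _ _).mpr hinf⟩
      · exact ⟨"unauthorized", by decide, (PySem.Str.isIn_iff_infix _ _).mpr hinf⟩

-- ===== VERDICT (by name: the statement is the Claim_ definition above) =====
theorem is_permission_error_spec : Claim_equal_is_permission_error := by
  intro feedback _
  unfold Spec_is_permission_error
  have key : is_permission_error feedback = true ↔ is_permission_error_alt feedback = true := by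
    rw [pvA_iff]
    unfold is_permission_error_alt
    rw [pvScan_iff]
  exact Bool.eq_iff_iff.mpr key
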